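-- pv_equiv track=rewrite | github.com/theokrueger/dog | generate_prime_factorization.py | coalesce_zeros
-- ===== SOURCE A (Python) =====
-- from math import log, ceil, floor
-- from dataclasses import dataclass
--
-- @dataclass
-- class Ops:
--     ALU_NO_OP = 0b0000
--     ALU_ADD_OP = 0b0001
--     ALU_SUB_OP = 0b0010
--     ALU_MUL_OP = 0b0011
--     ALU_DIV_OP = 0b0100
--     ALU_AND_OP = 0b0101
--     ALU_OR_OP = 0b0110
--     ALU_EQ_OP = 0b0111
--     ALU_GT_OP = 0b1000
--     ALU_GTE_OP = 0b1001
--     ALU_MOD_OP = 0b1010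
--     ALU_ADD_IM_OP = 0b1011
--     ALU_SUB_IM_OP = 0b1100
--     ALU_MUL_IM_OP = 0b1101
--     ALU_DIV_IM_OP = 0b1110
--     ALU_MOD_IM_OP = 0b1111
--     BRANCH_NO_OP = 0b00
--     BRANCH_NOTZERO_OP = 0b01
--     BRANCH_SUBOVERFLOW_OP = 0b10
--     BRANCH_ZERO_OP = 0b11
--     BRANCH_UNCONDITIONAL_OP = 0b100
--
-- def coalesce_zeros(N):
--     res = []
--     regs = [4+i for i in range(N)]
--
--     # pair registers until there's only one left
--     while len(regs) > 1:
--         can_kill = min(floor(len(regs)/2), N)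
--         res.append([*[[Ops.ALU_MUL_OP, regs[-i-1], regs[i], regs[i]] for i in range(can_kill)], [Ops.BRANCH_NO_OP, 0]])
--         regs = regs[:-can_kill]
--
--     return res
-- ===== SOURCE B (Python) =====
-- ALU_MUL_OP = 0b0011
-- BRANCH_NO_OP = 0b00
--
-- def coalesce_zeros(N):
--     # recursion on the prefix LENGTH only; register ids computed arithmetically
--     def rounds(length):
--         if length <= 1:
--             return []
--         k = length // 2
--         ops = [[ALU_MUL_OP, 4 + length - 1 - i, 4 + i, 4 + i] for i in range(k)]
--         ops.append([BRANCH_NO_OP, 0])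
--         return [ops] + rounds(length - k)
--     return rounds(N)
-- ===== Notes on version B (the rewrite author's own statement) =====
-- stated objective: simpler
-- what changed: Replaces the maintained register list (built by comprehension, indexed from both ends, and repeatedly sliced) with recursion on a single integer length, computing register ids arithmetically.
import Mathlib
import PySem

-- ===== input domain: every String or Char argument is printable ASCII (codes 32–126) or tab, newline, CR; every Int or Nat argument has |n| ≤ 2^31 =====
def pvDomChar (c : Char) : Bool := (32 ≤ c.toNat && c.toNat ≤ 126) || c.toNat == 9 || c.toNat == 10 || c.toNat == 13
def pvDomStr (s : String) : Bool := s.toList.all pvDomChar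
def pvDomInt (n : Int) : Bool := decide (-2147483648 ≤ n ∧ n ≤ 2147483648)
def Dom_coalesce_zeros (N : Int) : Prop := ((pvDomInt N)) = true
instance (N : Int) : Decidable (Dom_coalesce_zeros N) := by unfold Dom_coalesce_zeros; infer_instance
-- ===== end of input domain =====

-- B replaces A's maintained register list (comprehension, two-ended indexing, slicing)
-- with recursion on a single integer length; objective: simpler.

-- ===== PORT A =====
-- Ops.ALU_MUL_OP = 3, Ops.BRANCH_NO_OP = 0 (module constants, inlined).
-- while-loop as fuelled recursion: each iteration shrinks regs by at least one, so
-- N.toNat + 1 fuel is never exhausted (fuel only makes the transcription total);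
-- can_kill = min(floor(len(regs)/2), N), written out at each of its uses.
def pvLoopA (fuel : Nat) (N : Int) (regs : List Int) (res : List (List (List Int))) :
    List (List (List Int)) :=
  match fuel with
  | 0 => res
  | Nat.succ f =>
    if 1 < regs.length then
      pvLoopA f N
        (PySem.List.slice regs none (some (-(min (PySem.Int.floordiv (regs.length : Int) 2) N))))
        (res ++ [((PySem.List.pyRange 0 (min (PySem.Int.floordiv (regs.length : Int) 2) N) 1).map (fun i =>
          [3, PySem.List.pyGetD regs (-i - 1) 0, PySem.List.pyGetD regs i 0,
           PySem.List.pyGetD regs i 0])) ++ [[0, 0]]])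
    else res

def coalesce_zeros (N : Int) : List (List (List Int)) :=
  pvLoopA (N.toNat + 1) N ((PySem.List.pyRange 0 N 1).map (fun i => 4 + i)) []

-- ===== PORT B =====
def pvRoundsB (length : Int) : List (List (List Int)) :=
  if h : 1 < length then
    (((PySem.List.pyRange 0 (PySem.Int.floordiv length 2) 1).map (fun i =>
        [3, 4 + length - 1 - i, 4 + i, 4 + i])) ++ [[0, 0]])
      :: pvRoundsB (length - PySem.Int.floordiv length 2)
  else []
termination_by length.toNat
decreasing_by
  rw [PySem.Int.floordiv_eq_ediv_of_pos (by omega : (0:Int) < 2)]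
  omega

def coalesce_zeros_alt (N : Int) : List (List (List Int)) := pvRoundsB N

-- ===== PRECONDITION & SPEC =====
def Spec_coalesce_zeros (N : Int) (out : List (List (List Int))) : Prop := out = coalesce_zeros_alt N
instance (N : Int) (out : List (List (List Int))) : Decidable (Spec_coalesce_zeros N out) := by unfold Spec_coalesce_zeros; infer_instance

-- ===== CLAIM (what is proved, stated in full; the proofs are below) =====
def Claim_equal_coalesce_zeros : Prop := ∀ (N : Int), Dom_coalesce_zeros N → Spec_coalesce_zeros N (coalesce_zeros N)

-- ===== LEMMAS AND PROOFS =====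

-- A's register list is the prefix [4, …, 4+L-1], in List.range form.
def pvRegs (L : Int) : List Int := (List.range L.toNat).map (fun k : Nat => (4:Int) + (k:Int))

lemma pvRegs_eq (L : Int) :
    (PySem.List.pyRange 0 L 1).map (fun i => (4:Int) + i) = pvRegs L := by
  unfold pvRegs
  rw [PySem.List.pyRange_one, List.map_map]
  simp [Function.comp_def]

lemma pvRegs_length (L : Int) : (pvRegs L).length = L.toNat := by
  simp [pvRegs]

lemma pvLoopA_invariant (f : Nat) (N L : Int) (res : List (List (List Int)))
    (h0 : 0 ≤ L) (hLN : L ≤ N) (hf : L.toNat ≤ f) :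
    pvLoopA f N (pvRegs L) res = res ++ pvRoundsB L := by
  induction f generalizing L res with
  | zero =>
    have hL0 : L = 0 := by omega
    subst hL0
    rw [pvRoundsB]
    simp [pvLoopA]
  | succ f ih =>
    by_cases hL : 1 < L
    · have hlen : (pvRegs L).length = L.toNat := pvRegs_length L
      have hlenInt : ((pvRegs L).length : Int) = L := by rw [hlen]; omega
      have hk2 : (0:Int) < 2 := by omega
      have hkdef : min (PySem.Int.floordiv ((pvRegs L).length : Int) 2) N
          = PySem.Int.floordiv L 2 := by
        rw [hlenInt, PySem.Int.floordiv_eq_ediv_of_pos hk2]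
        have : L / 2 ≤ N := by omega
        omega
      rw [pvLoopA]
      rw [if_pos (by rw [hlen]; omega)]
      rw [hkdef]
      set k : Int := PySem.Int.floordiv L 2 with hkd
      have hkE : k = L / 2 := by rw [hkd, PySem.Int.floordiv_eq_ediv_of_pos hk2]
      have hk1 : 1 ≤ k := by omega
      have hkL : k < L := by omega
      -- (a) the emitted round is B's round: both index arithmetic on the prefix
      have hround : ((PySem.List.pyRange 0 k 1).map (fun i =>
            [3, PySem.List.pyGetD (pvRegs L) (-i - 1) 0,
             PySem.List.pyGetD (pvRegs L) i 0, PySem.List.pyGetD (pvRegs L) i 0]))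
          = (PySem.List.pyRange 0 k 1).map (fun i => [3, 4 + L - 1 - i, 4 + i, 4 + i]) := by
        apply List.map_congr_left
        intro i hi
        rw [PySem.List.mem_pyRange_one] at hi
        obtain ⟨hi0, hik⟩ := hi
        have hpos : PySem.List.pyGetD (pvRegs L) i 0 = 4 + i := by
          rw [PySem.List.pyGetD_eq_getElem _ _ hi0 (by rw [hlenInt]; omega)]
          unfold pvRegs
          simp only [List.getElem_map, List.getElem_range]
          omega
        have hneg : PySem.List.pyGetD (pvRegs L) (-i - 1) 0 = 4 + L - 1 - i := by
          have hm : (-i - 1) = -(((i.toNat + 1 : Nat) : Int)) := by push_cast; omega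
          rw [hm, PySem.List.pyGetD_neg_natCast _ _ _ (by omega) (by rw [hlen]; omega)]
          unfold pvRegs
          simp only [List.getElem_map, List.getElem_range, List.length_map, List.length_range]
          omega
        rw [hpos, hneg]
      rw [hround]
      -- (b) regs[:-can_kill] is the prefix of length L - k
      have hslice : PySem.List.slice (pvRegs L) none (some (-k)) = pvRegs (L - k) := by
        have hm : (-k) = -((k.toNat : Nat) : Int) := by omega
        rw [hm, PySem.List.slice_to_neg_natCast _ _ (by omega)]
        rw [hlen]
        unfold pvRegs
        rw [← List.map_take, List.take_range]
        rw [Nat.min_eq_left (by omega)]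
        have heq : L.toNat - k.toNat = (L - k).toNat := by omega
        rw [heq]
      rw [hslice]
      rw [ih (L - k) _ (by omega) (by omega) (by omega)]
      -- (c) unfold B one step and reassociate
      conv_rhs => rw [pvRoundsB]
      rw [dif_pos hL]
      simp [hkd]
    · rw [pvLoopA, if_neg (by rw [pvRegs_length]; omega)]
      rw [pvRoundsB, dif_neg hL]
      simp

-- ===== VERDICT (by name: the statement is the Claim_ definition above) =====
theorem coalesce_zeros_spec : Claim_equal_coalesce_zeros := by
  intro N _
  unfold Spec_coalesce_zeros coalesce_zeros coalesce_zeros_alt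
  rw [pvRegs_eq]
  by_cases hN : 0 ≤ N
  · have := pvLoopA_invariant (N.toNat + 1) N N [] hN (le_refl N) (by omega)
    simpa using this
  · -- N < 0: empty register list, loop exits at once; B yields [] as well
    rw [pvRoundsB, dif_neg (by omega)]
    have : pvRegs N = [] := by unfold pvRegs; simp; omega
    rw [this]
    simp [pvLoopA]
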